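-- pv_equiv track=rewrite | github.com/NAGENDRA-BABU-MARASU/EPI_PYTHON | epi_judge_python/nearest_repeated_entries.py | find_nearest_repetition
-- ===== SOURCE A (Python) =====
-- from typing import List
--
-- def find_nearest_repetition(paragraph: List[str]) -> int:
--     word_to_latest_index = {}
--     nearest_repeated_distance = float('inf')
--     for index, word in enumerate(paragraph):
--         if word in word_to_latest_index:
--             current_distance = index - word_to_latest_index[word]
--             nearest_repeated_distance = min(nearest_repeated_distance, current_distance)
--
--         word_to_latest_index[word] = index
--
--     return nearest_repeated_distance if nearest_repeated_distance != float('inf') else -1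
-- ===== SOURCE B (Python) =====
-- from typing import List
--
--
-- def find_nearest_repetition(paragraph: List[str]) -> int:
--     # Phase 1: group all occurrence indices by word.
--     positions = {}
--     for index, word in enumerate(paragraph):
--         if word in positions:
--             positions[word].append(index)
--         else:
--             positions[word] = [index]
--     # Phase 2: minimum gap between consecutive occurrences, over all groups.
--     best = float('inf')
--     for indices in positions.values():
--         for previous, current in zip(indices, indices[1:]):
--             best = min(best, current - previous)
--     return best if best != float('inf') else -1
-- ===== Notes on version B (the rewrite author's own statement) =====
-- stated objective: alternative
-- what changed: A folds a word-to-latest-index dict and updates the running minimum inside the single scan; B is two-phase: it first builds a word-to-all-indices map, then separately minimises consecutive-index differences per group.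
import Mathlib
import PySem

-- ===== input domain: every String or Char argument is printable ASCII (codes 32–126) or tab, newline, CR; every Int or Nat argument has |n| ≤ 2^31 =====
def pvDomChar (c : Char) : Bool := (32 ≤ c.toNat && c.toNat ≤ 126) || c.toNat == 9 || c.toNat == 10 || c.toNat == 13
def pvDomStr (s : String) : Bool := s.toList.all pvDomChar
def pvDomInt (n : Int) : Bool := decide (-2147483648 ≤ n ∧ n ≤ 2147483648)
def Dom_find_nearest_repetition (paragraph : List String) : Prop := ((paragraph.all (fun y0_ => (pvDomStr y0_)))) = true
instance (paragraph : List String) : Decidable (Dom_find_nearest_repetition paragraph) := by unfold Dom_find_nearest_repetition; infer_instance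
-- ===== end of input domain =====

-- B re-implements A as two phases (build word→all-indices map, then minimise consecutive gaps
-- per group) instead of A's single fold over a latest-index dict; same O(n) cost ("alternative").

-- Python's running minimum starts at float('inf'); all compared values are ints, so the state is
-- exactly `Option Int` with `none` = inf.  `omin acc x` = Python's `min(acc, x)`; shared by both ports.
def omin (acc : Option Int) (x : Int) : Option Int :=
  some (match acc with | none => x | some m => min m x)

-- ===== PORT A =====
-- one loop iteration of A: update the running min from the latest index, then overwrite it
def aStep (st : PySem.Dict String Int × Option Int) (iw : Int × String) :
    PySem.Dict String Int × Option Int :=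
  match st.1.get? iw.2 with
  | some j => (st.1.insert iw.2 iw.1, omin st.2 (iw.1 - j))
  | none   => (st.1.insert iw.2 iw.1, st.2)

def find_nearest_repetition (paragraph : List String) : Int :=
  match ((PySem.List.enumerate paragraph).foldl aStep (PySem.Dict.mk [], none)).2 with
  | some m => m
  | none   => -1

-- ===== PORT B =====
-- phase-1 iteration: append the index to the word's group (create the group if absent)
def bStep (d : PySem.Dict String (List Int)) (iw : Int × String) : PySem.Dict String (List Int) :=
  match d.get? iw.2 with
  | some l => d.insert iw.2 (l ++ [iw.1])
  | none   => d.insert iw.2 [iw.1]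

-- phase-2 inner loop over one group: zip(indices, indices[1:]) (Python's xs[1:] = xs.tail)
def bGroup (acc : Option Int) (indices : List Int) : Option Int :=
  (indices.zip indices.tail).foldl (fun a p => omin a (p.2 - p.1)) acc

def find_nearest_repetition_alt (paragraph : List String) : Int :=
  match ((PySem.List.enumerate paragraph).foldl bStep (PySem.Dict.mk [])).values.foldl bGroup none with
  | some m => m
  | none   => -1

-- ===== PRECONDITION & SPEC =====
def Spec_find_nearest_repetition (paragraph : List String) (out : Int) : Prop := out = find_nearest_repetition_alt paragraph
instance (paragraph : List String) (out : Int) : Decidable (Spec_find_nearest_repetition paragraph out) := by unfold Spec_find_nearest_repetition; infer_instance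

-- ===== CLAIM (what is proved, stated in full; the proofs are below) =====
def Claim_equal_find_nearest_repetition : Prop := ∀ (paragraph : List String), Dom_find_nearest_repetition paragraph → Spec_find_nearest_repetition paragraph (find_nearest_repetition paragraph)

-- ===== LEMMAS AND PROOFS =====

-- the projection relating B's groups to A's latest-index entries
def lastOf (kv : String × List Int) : String × Int := (kv.1, kv.2.getLastD 0)

theorem omin_swap (a : Option Int) (d x : Int) : omin (omin a d) x = omin (omin a x) d := by
  cases a <;> simp [omin, min_assoc, min_comm d x]

theorem foldl_omin_swap (ps : List (Int × Int)) (a : Option Int) (d : Int) :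
    ps.foldl (fun a p => omin a (p.2 - p.1)) (omin a d)
      = omin (ps.foldl (fun a p => omin a (p.2 - p.1)) a) d := by
  induction ps generalizing a with
  | nil => rfl
  | cons p t ih =>
    simp only [List.foldl_cons]
    rw [omin_swap, ih]

theorem bGroup_omin (a : Option Int) (d : Int) (l : List Int) :
    bGroup (omin a d) l = omin (bGroup a l) d := by
  simp [bGroup, foldl_omin_swap]

theorem foldl_bGroup_omin (vs : List (List Int)) (a : Option Int) (d : Int) :
    vs.foldl bGroup (omin a d) = omin (vs.foldl bGroup a) d := by
  induction vs generalizing a with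
  | nil => rfl
  | cons v t ih =>
    simp only [List.foldl_cons]
    rw [bGroup_omin, ih]

theorem zip_tail_concat (l : List Int) (hl : l ≠ []) (i : Int) :
    (l ++ [i]).zip (l ++ [i]).tail = l.zip l.tail ++ [(l.getLastD 0, i)] := by
  induction l with
  | nil => exact absurd rfl hl
  | cons x t ih =>
    cases t with
    | nil => simp
    | cons y u =>
      have := ih (by simp)
      simpa using this

theorem bGroup_concat (a : Option Int) (l : List Int) (hl : l ≠ []) (i : Int) :
    bGroup a (l ++ [i]) = omin (bGroup a l) (i - l.getLastD 0) := by
  simp [bGroup, zip_tail_concat l hl i]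

theorem get?_mk_map (L : List (String × List Int)) (k : String) :
    (PySem.Dict.mk (L.map lastOf)).get? k
      = ((PySem.Dict.mk L).get? k).map (fun l => l.getLastD 0) := by
  induction L with
  | nil => rfl
  | cons p t ih =>
    obtain ⟨k1, v1⟩ := p
    simp only [List.map_cons, lastOf, PySem.Dict.get?_mk_cons]
    by_cases h : (k1 == k) = true
    · rw [if_pos h, if_pos h]; rfl
    · rw [if_neg h, if_neg h]; exact ih

theorem map_id_of_key_ne {ν : Type} (L : List (String × ν)) (w : String) (f : String × ν → String × ν)
    (h : ∀ p ∈ L, p.1 ≠ w) :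
    L.map (fun p => if (p.1 == w) = true then f p else p) = L := by
  induction L with
  | nil => rfl
  | cons p t ih =>
    have h1 : (p.1 == w) = false := by simp [h p (by simp)]
    simp only [List.map_cons, h1, Bool.false_eq_true, if_false]
    rw [ih (fun q hq => h q (by simp [hq]))]

-- the main invariant: after processing any prefix of enumerated pairs, A's dict is the
-- entrywise-last projection of B's groups, B's groups are nonempty with nodup keys, and
-- A's running minimum equals the full phase-2 value computed on B's current groups.
theorem inv (ps : List (Int × String)) :
    (ps.foldl aStep (PySem.Dict.mk [], none)).1.items
        = ((ps.foldl bStep (PySem.Dict.mk [])).items.map lastOf)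
    ∧ (ps.foldl bStep (PySem.Dict.mk [])).keys.Nodup
    ∧ (∀ kv ∈ (ps.foldl bStep (PySem.Dict.mk [])).items, kv.2 ≠ [])
    ∧ (ps.foldl aStep (PySem.Dict.mk [], none)).2
        = ((ps.foldl bStep (PySem.Dict.mk [])).values.foldl bGroup none) := by
  induction ps using List.reverseRecOn with
  | nil =>
    refine ⟨rfl, by simp [PySem.Dict.keys], fun kv h => ?_, rfl⟩
    simp at h
  | append_singleton ps q ih =>
    obtain ⟨hitems, hnd, hne, hacc⟩ := ih
    obtain ⟨i, w⟩ := q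
    simp only [List.foldl_append, List.foldl_cons, List.foldl_nil]
    set stA := ps.foldl aStep (PySem.Dict.mk [], none) with hstA
    set dB := ps.foldl bStep (PySem.Dict.mk []) with hdB
    have hgetA : stA.1.get? w = (dB.get? w).map (fun l => l.getLastD 0) := by
      have h1 : stA.1 = PySem.Dict.mk (dB.items.map lastOf) := PySem.Dict.ext hitems
      rw [h1, get?_mk_map]
    cases hB : dB.get? w with
    | none =>
      have hcB : dB.contains w = false := (PySem.Dict.get?_eq_none_iff_contains dB w).mp hB
      have hA : stA.1.get? w = none := by rw [hgetA, hB]; rfl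
      have hcA : stA.1.contains w = false := (PySem.Dict.get?_eq_none_iff_contains _ w).mp hA
      have hAstep : aStep stA (i, w) = (stA.1.insert w i, stA.2) := by
        simp [aStep, hA]
      have hBstep : bStep dB (i, w) = dB.insert w [i] := by
        simp [bStep, hB]
      have hBitems : (dB.insert w [i]).items = dB.items ++ [(w, [i])] :=
        PySem.Dict.items_insert_of_not_contains _ _ hcB
      rw [hAstep, hBstep]
      refine ⟨?_, PySem.Dict.nodup_keys_insert _ _ _ hnd, ?_, ?_⟩
      · rw [PySem.Dict.items_insert_of_not_contains _ _ hcA, hBitems, hitems]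
        simp [lastOf]
      · rw [hBitems]
        intro kv hkv
        rcases List.mem_append.mp hkv with h | h
        · exact hne kv h
        · simp only [List.mem_singleton] at h
          subst h
          simp
      · show stA.2 = _
        rw [PySem.Dict.values, hBitems, hacc]
        simp only [List.map_append, List.foldl_append]
        rfl
    | some l =>
      have hcB : dB.contains w = true := by
        rw [PySem.Dict.contains_eq_isSome_get?, hB]; rfl
      have hA : stA.1.get? w = some (l.getLastD 0) := by rw [hgetA, hB]; rfl
      have hcA : stA.1.contains w = true := by
        rw [PySem.Dict.contains_eq_isSome_get?, hA]; rfl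
      have hAstep : aStep stA (i, w) = (stA.1.insert w i, omin stA.2 (i - l.getLastD 0)) := by
        simp [aStep, hA]
      have hBstep : bStep dB (i, w) = dB.insert w (l ++ [i]) := by
        simp [bStep, hB]
      have hlne : l ≠ [] := hne (w, l) (PySem.Dict.mem_items_of_get?_eq_some dB hB)
      obtain ⟨L1, L2, hsplit⟩ := List.append_of_mem (PySem.Dict.mem_items_of_get?_eq_some dB hB)
      have hnd' : (L1.map Prod.fst ++ w :: L2.map Prod.fst).Nodup := by
        have hk : dB.keys = L1.map Prod.fst ++ w :: L2.map Prod.fst := by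
          rw [PySem.Dict.keys, hsplit]; simp
        rwa [hk] at hnd
      have hparts := List.nodup_append.mp hnd'
      have hw1 : ∀ p ∈ L1, p.1 ≠ w := by
        intro p hp heq
        exact hparts.2.2 p.1 (List.mem_map_of_mem (f := Prod.fst) hp) w (List.mem_cons_self) heq
      have hw2 : ∀ p ∈ L2, p.1 ≠ w := by
        intro p hp heq
        exact (List.nodup_cons.mp hparts.2.1).1
          (heq ▸ List.mem_map_of_mem (f := Prod.fst) hp)
      have hBitems : (dB.insert w (l ++ [i])).items = L1 ++ (w, l ++ [i]) :: L2 := by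
        rw [PySem.Dict.items_insert_of_contains _ _ hcB, hsplit]
        simp only [List.map_append, List.map_cons, beq_self_eq_true, if_true]
        rw [map_id_of_key_ne L1 w _ hw1, map_id_of_key_ne L2 w _ hw2]
      rw [hAstep, hBstep]
      refine ⟨?_, PySem.Dict.nodup_keys_insert _ _ _ hnd, ?_, ?_⟩
      · rw [PySem.Dict.items_insert_of_contains _ _ hcA, hBitems, hitems, hsplit]
        simp only [List.map_append, List.map_cons, lastOf, beq_self_eq_true, if_true,
          List.getLastD_concat]
        rw [map_id_of_key_ne (L1.map lastOf) w _
              (by intro p hp; obtain ⟨q, hq, rfl⟩ := List.mem_map.mp hp; exact hw1 q hq),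
            map_id_of_key_ne (L2.map lastOf) w _
              (by intro p hp; obtain ⟨q, hq, rfl⟩ := List.mem_map.mp hp; exact hw2 q hq)]
      · rw [hBitems]
        intro kv hkv
        rcases List.mem_append.mp hkv with h | h
        · exact hne kv (by rw [hsplit]; exact List.mem_append.mpr (Or.inl h))
        · rcases List.mem_cons.mp h with h | h
          · subst h; simp
          · exact hne kv (by rw [hsplit]; simp [h])
      · show omin stA.2 (i - l.getLastD 0) = _
        rw [PySem.Dict.values, hBitems, hacc, PySem.Dict.values, hsplit]
        simp only [List.map_append, List.map_cons, List.foldl_append, List.foldl_cons]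
        rw [bGroup_concat _ l hlne i, foldl_bGroup_omin]

-- ===== VERDICT (by name: the statement is the Claim_ definition above) =====
theorem find_nearest_repetition_spec : Claim_equal_find_nearest_repetition := by
  intro paragraph _
  unfold Spec_find_nearest_repetition find_nearest_repetition find_nearest_repetition_alt
  rw [(inv (PySem.List.enumerate paragraph)).2.2.2]
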